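-- pv_equiv track=rewrite | github.com/2024-2-analitica-descriptiva/2024-2-LAB-01-programacion-basica-en-python-scuartasr | homework/pregunta_05.py | reducer_max
-- ===== SOURCE A (Python) =====
-- def reducer_max(lista_tupla):
--     """
--     Esta función recibe una lista de tuplas ordenadas y, para cada
--     elemento, busca el mayor valor posible.
--     """
--
--     retorno = {}
--
--     # Ciclo
--     for tupla in lista_tupla:
--         if tupla[0] in retorno:
--             if tupla[1] > retorno[tupla[0]]:
--                 retorno[tupla[0]] = tupla[1]
--         else:
--             retorno[tupla[0]] = tupla[1]
--
--     return retorno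
-- ===== SOURCE B (Python) =====
-- def reducer_max(lista_tupla):
--     # Two-pass group-then-reduce: collect every value under its key, then
--     # take the max of each group.
--     grupos = {}
--     for tupla in lista_tupla:
--         grupos.setdefault(tupla[0], []).append(tupla[1])
--     return {k: max(v) for k, v in grupos.items()}
-- ===== Notes on version B (the rewrite author's own statement) =====
-- stated objective: alternative
-- what changed: Replaced the single-pass running-maximum dict with a two-pass group-then-reduce: first accumulate all values per key into lists via setdefault, then build the result with a dict comprehension taking max of each group.
import Mathlib
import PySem

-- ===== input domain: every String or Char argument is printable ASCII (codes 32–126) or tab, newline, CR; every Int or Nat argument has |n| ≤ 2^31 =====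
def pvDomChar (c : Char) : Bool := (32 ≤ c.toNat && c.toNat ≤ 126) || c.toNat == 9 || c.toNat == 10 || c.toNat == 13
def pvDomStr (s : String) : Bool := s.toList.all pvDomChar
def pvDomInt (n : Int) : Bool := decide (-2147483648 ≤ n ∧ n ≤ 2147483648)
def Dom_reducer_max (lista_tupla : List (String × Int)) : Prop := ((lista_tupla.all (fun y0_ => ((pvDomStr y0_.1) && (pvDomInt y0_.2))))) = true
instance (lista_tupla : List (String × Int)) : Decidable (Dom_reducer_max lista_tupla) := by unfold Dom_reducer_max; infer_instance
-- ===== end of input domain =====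

-- B replaces A's single-pass running-maximum dict by a two-pass group-then-reduce
-- (values collected per key, then max of each group): a different decomposition, same cost.

-- ===== PORT A =====
-- one loop step of A: conditional running-max update of the dict
def reducerMaxStepA (d : PySem.Dict String Int) (p : String × Int) : PySem.Dict String Int :=
  if d.contains p.1 then
    (if d.getD p.1 0 < p.2 then d.insert p.1 p.2 else d)
  else d.insert p.1 p.2

def reducer_max (lista_tupla : List (String × Int)) : List (String × Int) :=
  (lista_tupla.foldl reducerMaxStepA PySem.Dict.empty).items

-- ===== PORT B =====
-- grupos.setdefault(k, []).append(v)  ≡  modify k [] (· ++ [v])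
def reducer_max_alt (lista_tupla : List (String × Int)) : List (String × Int) :=
  let grupos := lista_tupla.foldl (fun d p => d.modify p.1 [] (· ++ [p.2])) PySem.Dict.empty
  -- {k: max(v) for k, v in grupos.items()}; group lists are nonempty, so max never raises
  (grupos.items.foldl
      (fun d p => d.insert p.1 ((PySem.List.max? p.2 (fun y => y)).getD 0))
      PySem.Dict.empty).items

-- ===== PRECONDITION & SPEC =====
def Spec_reducer_max (lista_tupla : List (String × Int)) (out : List (String × Int)) : Prop := out = reducer_max_alt lista_tupla
instance (lista_tupla : List (String × Int)) (out : List (String × Int)) : Decidable (Spec_reducer_max lista_tupla out) := by unfold Spec_reducer_max; infer_instance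

-- ===== CLAIM (what is proved, stated in full; the proofs are below) =====
def Claim_equal_reducer_max : Prop := ∀ (lista_tupla : List (String × Int)), Dom_reducer_max lista_tupla → Spec_reducer_max lista_tupla (reducer_max lista_tupla)

-- ===== LEMMAS AND PROOFS =====

-- one comparison step of A's running maximum, on an optional current best
def stepOpt (o : Option Int) (b : Int) : Option Int :=
  match o with
  | none => some b
  | some a => some (if a < b then b else a)

lemma stepA_get? (d : PySem.Dict String Int) (p : String × Int) (k : String) :
    (reducerMaxStepA d p).get? k = if p.1 = k then stepOpt (d.get? p.1) p.2 else d.get? k := by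
  unfold reducerMaxStepA stepOpt
  rcases hc : d.contains p.1 with _ | _
  · have hg : d.get? p.1 = none := by
      rw [PySem.Dict.contains_eq_isSome_get?] at hc
      exact Option.not_isSome_iff_eq_none.mp (by simp [hc])
    rcases eq_or_ne p.1 k with hk | hk
    · subst hk; simp [hg]
    · simp [PySem.Dict.get?_insert, hk, Ne.symm hk]
  · rw [PySem.Dict.contains_eq_isSome_get?] at hc
    rcases hg : d.get? p.1 with _ | a
    · simp [hg] at hc
    · have hgd : d.getD p.1 0 = a := PySem.Dict.getD_of_get?_eq_some d 0 hg
      simp only [if_true, hgd]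
      by_cases hlt : a < p.2
      · rcases eq_or_ne p.1 k with hk | hk
        · subst hk; simp [hlt]
        · simp [hlt, PySem.Dict.get?_insert, hk, Ne.symm hk]
      · simp only [hlt, if_false]
        rcases eq_or_ne p.1 k with hk | hk
        · subst hk; simp [hg]
        · simp [hk]

lemma foldA_get? (l : List (String × Int)) (d : PySem.Dict String Int) (k : String) :
    (l.foldl reducerMaxStepA d).get? k
      = ((l.filter (fun p => p.1 == k)).map (·.2)).foldl stepOpt (d.get? k) := by
  induction l generalizing d with
  | nil => rfl
  | cons p t ih =>
      by_cases hk : p.1 = k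
      · simp only [List.foldl_cons, List.filter_cons, hk, BEq.rfl, if_true, List.map_cons]
        rw [ih, stepA_get? , if_pos hk, hk]
      · have hbk : (p.1 == k) = false := by simp [hk]
        simp only [List.foldl_cons, List.filter_cons, hbk, Bool.false_eq_true, if_false]
        rw [ih, stepA_get?, if_neg hk]

lemma stepA_keys (d : PySem.Dict String Int) (p : String × Int) :
    (reducerMaxStepA d p).keys = PySem.Set.add d.keys p.1 := by
  unfold reducerMaxStepA PySem.Set.add
  have hmem : PySem.Set.contains d.keys p.1 = d.contains p.1 := by
    simp [PySem.Set.contains, PySem.Dict.contains_eq_decide_mem_keys]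
  rcases hc : d.contains p.1 with _ | _
  · rw [hmem, hc]
    simp [PySem.Dict.keys_insert_of_not_contains d p.2 hc]
  · rw [hmem, hc]
    by_cases hlt : d.getD p.1 0 < p.2
    · simp [hlt, PySem.Dict.keys_insert_of_contains d p.2 hc]
    · simp [hlt]

lemma foldA_keys (l : List (String × Int)) (d : PySem.Dict String Int) :
    (l.foldl reducerMaxStepA d).keys = PySem.Set.update d.keys (l.map (·.1)) := by
  induction l generalizing d with
  | nil => rfl
  | cons p t ih =>
      simp only [List.foldl_cons, List.map_cons, PySem.Set.update, List.foldl_cons]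
      rw [ih, stepA_keys]; rfl

lemma stepA_nodup (d : PySem.Dict String Int) (p : String × Int) (h : d.keys.Nodup) :
    (reducerMaxStepA d p).keys.Nodup := by
  unfold reducerMaxStepA
  split_ifs <;> first | exact PySem.Dict.nodup_keys_insert _ _ _ h | exact h

lemma foldA_nodup (l : List (String × Int)) (d : PySem.Dict String Int) (h : d.keys.Nodup) :
    (l.foldl reducerMaxStepA d).keys.Nodup := by
  induction l generalizing d with
  | nil => exact h
  | cons p t ih => exact ih _ (stepA_nodup _ _ h)

lemma runMax_some (t : List Int) (a : Int) :
    t.foldl stepOpt (some a) = some (t.foldl max a) := by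
  induction t generalizing a with
  | nil => rfl
  | cons b t ih =>
      simp only [List.foldl_cons]
      rw [show stepOpt (some a) b = some (max a b) by
        unfold stepOpt; by_cases h : a < b <;> simp [h, max_def] <;> omega]
      exact ih _

theorem reducer_max_spec : Claim_equal_reducer_max := by
  unfold Claim_equal_reducer_max
  intro l _
  unfold Spec_reducer_max reducer_max reducer_max_alt
  set grupos := l.foldl (fun d p => d.modify p.1 [] (· ++ [p.2])) PySem.Dict.empty with hg
  have hgnd : grupos.keys.Nodup :=
    PySem.Dict.nodup_keys_foldl_modify_key l (·.1) [] (fun d p => (· ++ [p.2])) _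
      PySem.Dict.nodup_keys_empty
  have hgkeys : grupos.keys = PySem.Set.update PySem.Dict.empty.keys (l.map (·.1)) :=
    PySem.Dict.keys_foldl_modify_key l (·.1) [] (fun d p => (· ++ [p.2])) _
  have hitems : grupos.items = grupos.keys.map (fun k => (k, grupos.getD k [])) :=
    PySem.Dict.items_eq_map_keys grupos hgnd []
  -- the comprehension dict: inserts over the distinct keys of grupos append in order
  have hfresh : (grupos.items.foldl
      (fun d p => d.insert p.1 ((PySem.List.max? p.2 (fun y => y)).getD 0))
      PySem.Dict.empty).items
      = PySem.Dict.empty.items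
        ++ grupos.items.map (fun p => (p.1, (PySem.List.max? p.2 (fun y => y)).getD 0)) := by
    apply PySem.Dict.items_foldl_insert_fresh
    · intro p _; exact PySem.Dict.contains_empty _
    · have : grupos.items.map (·.1) = grupos.keys := rfl
      rw [this]; exact hgnd
  rw [hfresh]
  -- A's result items, over the same key list
  have hand : (l.foldl reducerMaxStepA PySem.Dict.empty).keys.Nodup :=
    foldA_nodup l _ PySem.Dict.nodup_keys_empty
  rw [PySem.Dict.items_eq_map_keys _ hand 0, foldA_keys, hitems, hgkeys]
  have hemp : (PySem.Dict.empty : PySem.Dict String Int).items = [] := rfl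
  simp only [hemp, List.nil_append, List.map_map]
  apply List.map_congr_left
  intro k hk
  simp only [Function.comp]
  congr 1
  -- pointwise: A's running max at k = max of B's group at k
  have hfilter : grupos.getD k [] = (l.filter (fun p => p.1 == k)).map (·.2) := by
    rw [hg]
    rw [PySem.Dict.getD_foldl_modify_append]
    simp
  have hget : (l.foldl reducerMaxStepA PySem.Dict.empty).get? k
      = ((l.filter (fun p => p.1 == k)).map (·.2)).foldl stepOpt none := by
    rw [foldA_get?]; rfl
  -- k is a key of grupos, so its group list is nonempty
  have hkl : k ∈ l.map (·.1) := by
    rcases (PySem.Set.mem_update _ _ _).mp hk with h | h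
    · simp [PySem.Dict.keys_empty] at h
    · exact h
  have hne : (l.filter (fun p => p.1 == k)).map (·.2) ≠ [] := by
    simp only [ne_eq, List.map_eq_nil_iff, List.filter_eq_nil_iff]
    intro h
    rcases List.mem_map.mp hkl with ⟨p, hp, hpk⟩
    exact (h p hp) (by simp [hpk])
  rcases hvs : (l.filter (fun p => p.1 == k)).map (·.2) with _ | ⟨v, t⟩
  · exact absurd hvs hne
  · rw [hfilter, hvs]
    rw [PySem.List.max?_id_cons]
    have : (l.foldl reducerMaxStepA PySem.Dict.empty).get? k = some (t.foldl max v) := by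
      rw [hget, hvs]
      simpa using runMax_some t v
    rw [PySem.Dict.getD_eq_get?_getD, this]
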